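-- pv_equiv track=rewrite | github.com/CRISTAL-3DSAM/InterFormer | InterFormer-K3HI/classifier.py | get_true_label
-- ===== SOURCE A (Python) =====
-- def get_true_label(class_to_idx):
--     idx_orig = {0: "approaching",
--                 1: "departing",
--                 2: "kicking",
--                 3: "pushing",
--                 4: "shaking",
--                 5: "exchanging",
--                 6: "punching",
--                 7: "pointing"}
--     idx_true = []
--     for i in range(len(idx_orig)):
--         name_orig =idx_orig[i]
--         for j in range(len(class_to_idx)):
--             name_new =class_to_idx[j]
--             if name_new ==name_orig:
--                 idx_true.append(j)
--     return idx_true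
-- ===== SOURCE B (Python) =====
-- def get_true_label(class_to_idx):
--     idx_orig = {0: "approaching",
--                 1: "departing",
--                 2: "kicking",
--                 3: "pushing",
--                 4: "shaking",
--                 5: "exchanging",
--                 6: "punching",
--                 7: "pointing"}
--     # one pass: invert class_to_idx into name -> list of indices (increasing)
--     by_name = {}
--     for j in range(len(class_to_idx)):
--         by_name.setdefault(class_to_idx[j], []).append(j)
--     # second pass: look each canonical name up once
--     idx_true = []
--     for i in range(len(idx_orig)):
--         idx_true.extend(by_name.get(idx_orig[i], []))
--     return idx_true
-- ===== Notes on version B (the rewrite author's own statement) =====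
-- stated objective: alternative
-- what changed: A rescans the whole dict once per canonical name (8 nested scans); B builds an inverted index name->list-of-indices in one pass over the dict, then emits the 8 canonical names' lists by direct lookup.
-- outside the precondition, e.g. on get_true_label({1: 'kicking'}): A raises KeyError, B raises KeyError
import Mathlib
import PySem

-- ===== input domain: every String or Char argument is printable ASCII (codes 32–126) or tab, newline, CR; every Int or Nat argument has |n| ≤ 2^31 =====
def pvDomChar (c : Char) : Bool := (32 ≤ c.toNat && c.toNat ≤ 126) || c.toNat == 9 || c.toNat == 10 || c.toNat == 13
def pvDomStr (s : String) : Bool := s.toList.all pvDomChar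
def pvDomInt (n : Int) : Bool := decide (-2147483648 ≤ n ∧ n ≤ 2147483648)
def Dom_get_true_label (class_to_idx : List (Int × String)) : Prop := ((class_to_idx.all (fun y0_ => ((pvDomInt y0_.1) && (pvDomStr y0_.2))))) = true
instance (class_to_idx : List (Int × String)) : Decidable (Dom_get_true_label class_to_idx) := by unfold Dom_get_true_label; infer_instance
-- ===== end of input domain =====

-- B replaces A's 8 repeated scans of the dict by one inverted-index pass plus 8 lookups (objective: alternative).


def pvIdxOrig : PySem.Dict Int String :=
  PySem.Dict.ofList [(0, "approaching"), (1, "departing"), (2, "kicking"), (3, "pushing"),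
                     (4, "shaking"), (5, "exchanging"), (6, "punching"), (7, "pointing")]

-- ===== PORT A =====
-- dict lookups class_to_idx[j] / idx_orig[i] are total under Pre_ (all keys 0..len-1 present); ported as getD
def get_true_label (class_to_idx : List (Int × String)) : List Int :=
  let d : PySem.Dict Int String := PySem.Dict.mk class_to_idx
  let idx_orig := pvIdxOrig
  (PySem.List.pyRange 0 (PySem.Dict.size idx_orig) 1).foldl
    (fun idx_true i =>
      let name_orig := idx_orig.getD i ""
      (PySem.List.pyRange 0 (PySem.Dict.size d) 1).foldl
        (fun acc j =>
          let name_new := d.getD j ""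
          if name_new == name_orig then acc ++ [j] else acc)
        idx_true)
    []

-- ===== PORT B =====
-- by_name.setdefault(name, []).append(j) is ported as Dict.modify name [] (· ++ [j]) — the same dict update
def get_true_label_alt (class_to_idx : List (Int × String)) : List Int :=
  let d : PySem.Dict Int String := PySem.Dict.mk class_to_idx
  let idx_orig := pvIdxOrig
  let by_name : PySem.Dict String (List Int) :=
    (PySem.List.pyRange 0 (PySem.Dict.size d) 1).foldl
      (fun bn j => bn.modify (d.getD j "") [] (· ++ [j])) PySem.Dict.empty
  (PySem.List.pyRange 0 (PySem.Dict.size idx_orig) 1).foldl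
    (fun idx_true i => idx_true ++ by_name.getD (idx_orig.getD i "") [])
    []

-- ===== PRECONDITION & SPEC =====
-- Pre_ excludes (a) inputs where A raises KeyError (some j in 0..len-1 is not a key) and
-- (b) association lists with duplicate keys, which do not represent a Python dict (dict() would deduplicate).
def Pre_get_true_label (class_to_idx : List (Int × String)) : Prop :=
  (class_to_idx.map Prod.fst).Nodup ∧
  ∀ j < class_to_idx.length, (j : Int) ∈ class_to_idx.map Prod.fst
instance (class_to_idx : List (Int × String)) : Decidable (Pre_get_true_label class_to_idx) := by
  unfold Pre_get_true_label; infer_instance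
def pvWitness_get_true_label : (List (Int × String)) := [(0, "kicking"), (1, "approaching"), (2, "kicking")]
def Spec_get_true_label (class_to_idx : List (Int × String)) (out : List Int) : Prop := out = get_true_label_alt class_to_idx
instance (class_to_idx : List (Int × String)) (out : List Int) : Decidable (Spec_get_true_label class_to_idx out) := by unfold Spec_get_true_label; infer_instance

-- ===== CLAIM (what is proved, stated in full; the proofs are below) =====
def Claim_equal_get_true_label : Prop := ∀ (class_to_idx : List (Int × String)), Dom_get_true_label class_to_idx → Pre_get_true_label class_to_idx → Spec_get_true_label class_to_idx (get_true_label class_to_idx)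

-- ===== LEMMAS AND PROOFS =====

-- B's inverted-index loop: the list stored under name c is exactly the filtered index list
lemma getD_byName (l : List Int) (key : Int → String) (bn : PySem.Dict String (List Int)) (c : String) :
    (l.foldl (fun bn j => bn.modify (key j) [] (· ++ [j])) bn).getD c []
      = bn.getD c [] ++ l.filter (fun j => key j == c) := by
  induction l generalizing bn with
  | nil => simp
  | cons x xs ih =>
    simp only [List.foldl_cons, List.filter_cons, ih]
    by_cases h : key x = c
    · subst h
      simp [PySem.Dict.getD_modify_self]
    · rw [PySem.Dict.getD_modify_of_ne _ _ _ (fun hc => h hc.symm)]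
      simp [h]

theorem get_true_label_spec : Claim_equal_get_true_label := by
  intro ctx _ _
  unfold Spec_get_true_label get_true_label get_true_label_alt
  simp only [PySem.List.foldl_append_if_eq_filter, getD_byName, PySem.Dict.getD_empty,
    List.nil_append]
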